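-- pv_equiv track=rewrite | github.com/uwriym/programmers-solutions | lv0/배열 만들기 4.py | solution
-- ===== SOURCE A (Python) =====
-- def solution(arr):
--     stk = []
--     i = 0
--     time = 0
--     while i < len(arr):
--         if len(stk) == 0:
--             stk.append(arr[i])
--             i += 1
--         elif stk[-1] < arr[i]:
--             stk += [arr[i]]
--             i += 1
--         else:
--             stk.pop()
--
--         time += 1
--     return stk
-- ===== SOURCE B (Python) =====
-- def solution(arr):
--     res = []
--     m = None
--     for x in reversed(arr):
--         if m is None or x < m:
--             res.append(x)
--             m = x
--     res.reverse()
--     return res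
-- ===== Notes on version B (the rewrite author's own statement) =====
-- stated objective: alternative
-- what changed: Replaces the monotonic stack (push/pop with a backtracking index) by a single right-to-left scan keeping only a scalar running minimum: an element is kept iff it is strictly below the minimum of the suffix after it, so no stack is built or popped.
import Mathlib
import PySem

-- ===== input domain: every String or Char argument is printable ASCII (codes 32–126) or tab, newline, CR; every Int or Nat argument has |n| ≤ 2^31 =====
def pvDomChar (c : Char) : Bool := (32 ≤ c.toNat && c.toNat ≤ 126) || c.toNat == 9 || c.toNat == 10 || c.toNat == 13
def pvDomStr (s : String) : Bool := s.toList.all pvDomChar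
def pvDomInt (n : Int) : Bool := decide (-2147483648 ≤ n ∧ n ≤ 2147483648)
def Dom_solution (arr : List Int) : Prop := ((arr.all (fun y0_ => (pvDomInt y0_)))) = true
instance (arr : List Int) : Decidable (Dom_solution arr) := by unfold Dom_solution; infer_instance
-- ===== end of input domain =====

-- B replaces A's monotonic stack by a right-to-left scan carrying only a running-minimum
-- scalar (an element survives iff it is strictly below every later element); objective: alternative.

-- ===== PORT A =====
-- A's single while loop over state (stk, i); time is unused and dropped.
def solutionAux (arr : List Int) (stk : List Int) (i : Nat) : List Int :=
  if _h : i < arr.length then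
    if stk.length = 0 then
      solutionAux arr (stk ++ [arr[i]]) (i + 1)
    else if stk.getLast! < arr[i] then
      solutionAux arr (stk ++ [arr[i]]) (i + 1)
    else
      solutionAux arr stk.dropLast i
  else stk
termination_by (arr.length - i) * 2 + stk.length
decreasing_by
  · simp; omega
  · simp; omega
  · have : stk.length ≠ 0 := by assumption
    have := stk.length_dropLast
    omega

def solution (arr : List Int) : List Int := solutionAux arr [] 0

-- ===== PORT B =====
-- Source B: one pass over reversed(arr) with state (res, m); append x when m is None or x < m.
def solution_alt (arr : List Int) : List Int :=
  let p := arr.reverse.foldl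
    (fun (p : List Int × Option Int) x =>
      match p.2 with
      | none => (p.1 ++ [x], some x)
      | some m => if x < m then (p.1 ++ [x], some x) else p)
    ([], none)
  p.1.reverse

-- ===== PRECONDITION & SPEC =====
def Spec_solution (arr : List Int) (out : List Int) : Prop := out = solution_alt arr
instance (arr : List Int) (out : List Int) : Decidable (Spec_solution arr out) := by unfold Spec_solution; infer_instance

-- ===== CLAIM =====
def Claim_equal_solution : Prop := ∀ (arr : List Int), Dom_solution arr → Spec_solution arr (solution arr)

-- ===== LEMMAS AND PROOFS =====

-- The common specification: keep x iff x is strictly smaller than every later element.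
def keepSpec : List Int → List Int
  | [] => []
  | x :: t => if t.all (fun y => x < y) then x :: keepSpec t else keepSpec t

lemma keepSpec_subset {l : List Int} {a : Int} (h : a ∈ keepSpec l) : a ∈ l := by
  induction l with
  | nil => simpa [keepSpec] using h
  | cons x t ih =>
      simp only [keepSpec] at h
      split at h
      · rcases List.mem_cons.mp h with h | h
        · simp [h]
        · exact List.mem_cons_of_mem _ (ih h)
      · exact List.mem_cons_of_mem _ (ih h)

lemma keepSpec_pairwise (l : List Int) : (keepSpec l).Pairwise (· < ·) := by
  induction l with
  | nil => simp [keepSpec]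
  | cons x t ih =>
      simp only [keepSpec]
      split
      · refine List.pairwise_cons.mpr ⟨?_, ih⟩
        intro a ha
        have := keepSpec_subset ha
        next hall => exact (List.all_eq_true.mp hall a this : decide (x < a) = true) |> of_decide_eq_true
      · exact ih

-- `while stk and stk[-1] >= x: stk.pop()` (A's pop branch, repeated).
def popWhile (x : Int) (stk : List Int) : List Int :=
  if h : stk ≠ [] then
    if x ≤ stk.getLast! then popWhile x stk.dropLast else stk
  else stk
termination_by stk.length
decreasing_by
  have := stk.length_dropLast
  have : stk.length ≠ 0 := by simpa [List.length_eq_zero_iff] using h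
  omega

-- One index of A's loop does exactly one pop-group then a push.
lemma step_aux (arr : List Int) (i : Nat) (h : i < arr.length) :
    ∀ n stk, stk.length ≤ n →
      solutionAux arr stk i = solutionAux arr (popWhile arr[i] stk ++ [arr[i]]) (i + 1) := by
  intro n
  induction n with
  | zero =>
      intro stk hlen
      have hstk : stk = [] := by
        cases stk with
        | nil => rfl
        | cons a t => simp at hlen
      subst hstk
      rw [solutionAux, popWhile]
      simp [h]
  | succ m ih =>
      intro stk hlen
      by_cases hs : stk = []
      · subst hs
        rw [solutionAux, popWhile]
        simp [h]
      · have hne : stk.length ≠ 0 := by simpa [List.length_eq_zero_iff] using hs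
        rw [solutionAux]
        simp only [h, dif_pos]
        rw [if_neg hne]
        by_cases hc : stk.getLast! < arr[i]
        · rw [if_pos hc]
          rw [popWhile]
          rw [dif_pos hs, if_neg (by omega)]
        · rw [if_neg hc]
          have hlen' : stk.dropLast.length ≤ m := by
            have := stk.length_dropLast; omega
          have heq : popWhile arr[i] stk = popWhile arr[i] stk.dropLast := by
            conv_lhs => rw [popWhile]
            rw [dif_pos hs, if_pos (by omega)]
          rw [ih stk.dropLast hlen', heq]

lemma step (arr : List Int) (i : Nat) (h : i < arr.length) (stk : List Int) :
    solutionAux arr stk i = solutionAux arr (popWhile arr[i] stk ++ [arr[i]]) (i + 1) :=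
  step_aux arr i h stk.length stk le_rfl

-- A's loop from index i equals a fold of pop-group-then-push over the remaining suffix.
lemma aux_eq_foldl (arr : List Int) :
    ∀ k i stk, arr.length - i ≤ k →
      solutionAux arr stk i =
        (arr.drop i).foldl (fun stk x => popWhile x stk ++ [x]) stk := by
  intro k
  induction k with
  | zero =>
      intro i stk hk
      have hge : arr.length ≤ i := by omega
      rw [solutionAux]
      simp [List.drop_eq_nil_of_le hge, Nat.not_lt.mpr hge]
  | succ m ih =>
      intro i stk hk
      by_cases h : i < arr.length
      · rw [step arr i h stk]
        rw [ih (i + 1) _ (by omega)]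
        conv_rhs => rw [List.drop_eq_getElem_cons h, List.foldl_cons]
      · rw [solutionAux]
        simp [List.drop_eq_nil_of_le (Nat.not_lt.mp h), h]

-- popWhile on a strictly increasing list is filtering by (· < x).
lemma popWhile_eq_filter (x : Int) :
    ∀ (l : List Int), l.Pairwise (· < ·) → popWhile x l = l.filter (fun a => a < x) := by
  intro l
  induction l using List.reverseRecOn with
  | nil => intro _; simp [popWhile]
  | append_singleton l a ih =>
      intro hp
      have hp' : l.Pairwise (· < ·) := (List.pairwise_append.mp hp).1
      have hall : ∀ b ∈ l, b < a := by
        intro b hb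
        exact (List.pairwise_append.mp hp).2.2 b hb a (List.mem_singleton_self a)
      rw [popWhile]
      have hne : l ++ [a] ≠ [] := by simp
      rw [dif_pos hne]
      have hlast : (l ++ [a]).getLast! = a := by
        simp
      rw [hlast]
      by_cases hc : x ≤ a
      · rw [if_pos hc]
        have : (l ++ [a]).dropLast = l := by simp
        rw [this, ih hp']
        have hax : ¬ (a < x) := by omega
        simp [List.filter_append, hax]
      · rw [if_neg hc]
        have hfl : l.filter (fun a => decide (a < x)) = l := by
          apply List.filter_eq_self.mpr
          intro b hb
          have := hall b hb
          simp; omega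
        simp [List.filter_append, hfl]
        simp [show a < x by omega]

-- keepSpec over a snoc: old survivors must also beat the new last element, which itself survives.
lemma keepSpec_snoc (l : List Int) (x : Int) :
    keepSpec (l ++ [x]) = (keepSpec l).filter (fun a => a < x) ++ [x] := by
  induction l with
  | nil => simp [keepSpec]
  | cons a t ih =>
      simp only [List.cons_append, keepSpec, ih]
      by_cases h1 : t.all (fun y => a < y)
      · by_cases h2 : a < x
        · have : (t ++ [x]).all (fun y => a < y) := by
            simp_all
          simp [this, h1, h2]
        · have : ¬ (t ++ [x]).all (fun y => a < y) := by
            simp_all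
          simp [this, h1, h2]
      · have : ¬ ((t ++ [x]).all (fun y => a < y) = true) := by
          simp only [List.all_append, Bool.and_eq_true]
          intro hh
          exact h1 hh.1
        simp [this, h1]

-- A's fold builds exactly keepSpec.
lemma foldA_eq_keepSpec (l : List Int) :
    l.foldl (fun stk x => popWhile x stk ++ [x]) [] = keepSpec l := by
  induction l using List.reverseRecOn with
  | nil => simp [keepSpec]
  | append_singleton l x ih =>
      rw [List.foldl_append, List.foldl_cons, List.foldl_nil, ih,
        popWhile_eq_filter x _ (keepSpec_pairwise l), keepSpec_snoc]

-- B's state after scanning (t.reverse): collected survivors of t (in reverse) and the min of t.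
def bStep (p : List Int × Option Int) (x : Int) : List Int × Option Int :=
  match p.2 with
  | none => (p.1 ++ [x], some x)
  | some m => if x < m then (p.1 ++ [x], some x) else p

def minOpt : List Int → Option Int
  | [] => none
  | x :: t => match minOpt t with
    | none => some x
    | some m => some (min x m)

lemma lt_minOpt_iff (x : Int) (l : List Int) :
    (match minOpt l with | none => True | some m => x < m) ↔ l.all (fun y => x < y) = true := by
  induction l with
  | nil => simp [minOpt]
  | cons a t ih =>
      simp only [minOpt, List.all_cons]
      cases h : minOpt t with
      | none =>
          have ht : t.all (fun y => decide (x < y)) = true := by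
            rw [← ih]; simp [h]
          simp [ht]
      | some m =>
          rw [h] at ih
          simp only [lt_inf_iff]
          simp only at ih
          constructor
          · rintro ⟨h1, h2⟩; simp [h1, ih.mp h2]
          · intro hh
            simp only [Bool.and_eq_true, decide_eq_true_eq] at hh
            exact ⟨hh.1, by simpa [ih] using hh.2⟩

lemma foldB_inv (l : List Int) :
    l.reverse.foldl bStep ([], none) = ((keepSpec l).reverse, minOpt l) := by
  induction l with
  | nil => simp [keepSpec, minOpt]
  | cons x t ih =>
      rw [List.reverse_cons, List.foldl_append, ih, List.foldl_cons, List.foldl_nil]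
      simp only [keepSpec, minOpt, bStep]
      cases h : minOpt t with
      | none =>
          have ht : t.all (fun y => decide (x < y)) = true := by
            rw [← lt_minOpt_iff]; simp [h]
          simp [ht]
      | some m =>
          have hiff := lt_minOpt_iff x t
          rw [h] at hiff
          by_cases hc : x < m
          · have ht := hiff.mp hc
            simp only at ht
            simp [hc, ht, min_eq_left hc.le]
          · have ht : ¬ t.all (fun y => decide (x < y)) = true := fun hh => hc (hiff.mpr hh)
            simp only at ht
            simp [hc, ht, min_eq_right (not_lt.mp hc)]

-- ===== VERDICT =====
theorem solution_spec : Claim_equal_solution := by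
  intro arr _
  unfold Spec_solution solution solution_alt
  rw [aux_eq_foldl arr arr.length 0 [] (by omega)]
  show _ = (arr.reverse.foldl bStep ([], none)).1.reverse
  rw [foldB_inv]
  simp [foldA_eq_keepSpec]
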